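-- pv_equiv track=rewrite | github.com/hyemhyemmu/learning-CS | CS61A/4. proj/2. cats/cats.py | furry_fixes
-- ===== SOURCE A (Python) =====
-- def furry_fixes(typed, source, limit):
--     """A diff function for autocorrect that determines how many letters
--     in TYPED need to be substituted to create SOURCE, then adds the difference in
--     their lengths and returns the result.
--
--     Arguments:
--         typed: a starting word
--         source: a string representing a desired goal word
--         limit: a number representing an upper bound on the number of chars that must change
--
--     >>> big_limit = 10
--     >>> furry_fixes("nice", "rice", big_limit)    # Substitute: n -> r
--     1
--     >>> furry_fixes("range", "rungs", big_limit)  # Substitute: a -> u, e -> s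
--     2
--     >>> furry_fixes("pill", "pillage", big_limit) # Don't substitute anything, length difference of 3.
--     3
--     >>> furry_fixes("roses", "arose", big_limit)  # Substitute: r -> a, o -> r, s -> o, e -> s, s -> e
--     5
--     >>> furry_fixes("rose", "hello", big_limit)   # Substitute: r->h, o->e, s->l, e->l, length difference of 1.
--     5
--     """
--
--     # BEGIN PROBLEM 6
--     if limit < 0:
--         # we don't have to get the actual number, we only need to know if it is bigger than limit
--         return limit + 1
--     # typed becomes empty
--     if not typed:
--         return len(source)
--     elif not source:
--         return len(typed)
--
--     if typed[0] == source[0]: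
--         return furry_fixes(typed[1:], source[1:], limit)
--     else:
--         return 1 + furry_fixes(typed[1:], source[1:], limit - 1)
-- ===== SOURCE B (Python) =====
-- def furry_fixes(typed, source, limit):
--     subs = sum(1 for a, b in zip(typed, source) if a != b)
--     if limit < 0 or subs > limit:
--         return limit + 1
--     return subs + abs(len(typed) - len(source))
-- ===== Notes on version B (the rewrite author's own statement) =====
-- stated objective: simpler
-- what changed: Replaces the recursion over string tails with per-step limit decrement and early exit by a single zip pass counting substitutions plus a closed-form length difference and one limit comparison.
import Mathlib
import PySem

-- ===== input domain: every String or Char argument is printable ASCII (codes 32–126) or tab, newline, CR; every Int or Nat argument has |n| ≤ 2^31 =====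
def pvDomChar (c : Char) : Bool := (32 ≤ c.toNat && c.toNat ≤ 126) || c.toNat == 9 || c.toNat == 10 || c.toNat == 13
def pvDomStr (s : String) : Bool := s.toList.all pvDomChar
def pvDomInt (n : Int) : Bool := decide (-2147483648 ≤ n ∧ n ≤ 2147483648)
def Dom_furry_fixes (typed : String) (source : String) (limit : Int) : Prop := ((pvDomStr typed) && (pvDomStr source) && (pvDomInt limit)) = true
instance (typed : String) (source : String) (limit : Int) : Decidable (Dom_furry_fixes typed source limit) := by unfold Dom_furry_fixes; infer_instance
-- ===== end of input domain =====

-- B replaces A's tail recursion with early exit by a single zip-count of substitutions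
-- plus a closed-form length difference (objective: simpler).

-- ===== PORT A =====
-- A's recursion on the characters of typed/source (typed[1:] etc.), limit check first.
def furryFixesA : List Char → List Char → Int → Int
  | t, s, limit =>
    if limit < 0 then limit + 1
    else
      match t, s with
      | [], s => (s.length : Int)
      | t, [] => (t.length : Int)
      | c :: t', d :: s' =>
        if c = d then furryFixesA t' s' limit
        else 1 + furryFixesA t' s' (limit - 1)
  termination_by t _ _ => t.length

def furry_fixes (typed : String) (source : String) (limit : Int) : Int :=
  furryFixesA typed.toList source.toList limit

-- ===== PORT B =====
-- sum(1 for a, b in zip(typed, source) if a != b)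
def subsCount (t s : List Char) : Int :=
  (t.zip s).foldl (fun acc p => if p.1 ≠ p.2 then acc + 1 else acc) 0

def furry_fixes_alt (typed : String) (source : String) (limit : Int) : Int :=
  let subs := subsCount typed.toList source.toList
  if limit < 0 || subs > limit then limit + 1
  else subs + |(typed.toList.length : Int) - (source.toList.length : Int)|

-- ===== PRECONDITION & SPEC =====
def Spec_furry_fixes (typed : String) (source : String) (limit : Int) (out : Int) : Prop := out = furry_fixes_alt typed source limit
instance (typed : String) (source : String) (limit : Int) (out : Int) : Decidable (Spec_furry_fixes typed source limit out) := by unfold Spec_furry_fixes; infer_instance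

-- ===== CLAIM (what is proved, stated in full; the proofs are below) =====
def Claim_equal_furry_fixes : Prop := ∀ (typed : String) (source : String) (limit : Int), Dom_furry_fixes typed source limit → Spec_furry_fixes typed source limit (furry_fixes typed source limit)

-- ===== LEMMAS AND PROOFS =====

theorem subsCount_shift (l : List (Char × Char)) (a : Int) :
    l.foldl (fun acc p => if p.1 ≠ p.2 then acc + 1 else acc) a
      = a + l.foldl (fun acc p => if p.1 ≠ p.2 then acc + 1 else acc) 0 := by
  induction l generalizing a with
  | nil => simp
  | cons p l ih =>
    simp only [List.foldl_cons]
    rw [ih, ih (if p.1 ≠ p.2 then 0 + 1 else 0)]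
    split_ifs <;> omega

theorem subsCount_nil_right (t : List Char) : subsCount t [] = 0 := by
  cases t <;> simp [subsCount]

theorem subsCount_cons (c d : Char) (t s : List Char) :
    subsCount (c :: t) (d :: s) = (if c = d then 0 else 1) + subsCount t s := by
  simp only [subsCount, List.zip_cons_cons, List.foldl_cons]
  rw [subsCount_shift]
  split_ifs <;> simp_all

theorem subsCount_nonneg (t s : List Char) : 0 ≤ subsCount t s := by
  induction t generalizing s with
  | nil => simp [subsCount]
  | cons c t ih =>
    cases s with
    | nil => simp [subsCount_nil_right]
    | cons d s => rw [subsCount_cons]; have := ih s; split_ifs <;> omega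

theorem furryFixesA_eq (t s : List Char) (limit : Int) :
    furryFixesA t s limit =
      (if limit < 0 || subsCount t s > limit then limit + 1
       else subsCount t s + |(t.length : Int) - (s.length : Int)|) := by
  induction t generalizing s limit with
  | nil =>
    rw [furryFixesA]
    by_cases hl : limit < 0
    · simp [hl]
    · have h0 : subsCount [] s = 0 := by simp [subsCount]
      rw [if_neg hl, if_neg (by simp [h0]; omega)]
      simp [h0, abs_of_nonneg]
  | cons c t ih =>
    cases s with
    | nil =>
      have hA : furryFixesA (c :: t) [] limit
          = if limit < 0 then limit + 1 else ((c :: t).length : Int) := by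
        rw [furryFixesA]
        intro h
        simp at h
      rw [hA, subsCount_nil_right]
      by_cases hl : limit < 0
      · simp [hl]
      · rw [if_neg hl, if_neg (by simp; omega)]
        simp
        rw [abs_of_nonneg (by positivity)]
    | cons d s =>
      rw [furryFixesA, subsCount_cons]
      have hnn := subsCount_nonneg t s
      by_cases hl : limit < 0
      · rw [if_pos hl, if_pos (by simp; omega)]
      · rw [if_neg hl]
        have hlen : |((c :: t).length : Int) - ((d :: s).length : Int)|
            = |(t.length : Int) - (s.length : Int)| := by
          simp only [List.length_cons]
          push_cast
          ring_nf
        by_cases hcd : c = d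
        · rw [if_pos hcd, if_pos hcd, ih, hlen]
          split_ifs with h1 h2 <;> simp_all <;> omega
        · rw [if_neg hcd, if_neg hcd, ih, hlen]
          split_ifs with h1 h2 <;> simp_all <;> omega

-- ===== VERDICT (by name: the statement is the Claim_ definition above) =====
theorem furry_fixes_spec : Claim_equal_furry_fixes := by
  intro typed source limit _
  unfold Spec_furry_fixes furry_fixes furry_fixes_alt
  rw [furryFixesA_eq]
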